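-- pv_equiv track=rewrite | github.com/MrittikaDutta/Python-Tutorial-1 | PYTHON TUTORIAL 1/histogram.py | transcript
-- ===== SOURCE A (Python) =====
-- def transcript(coursedetails, studentdetails, grades):
--     # Create dictionaries to store course details and student details for efficient lookup
--     course_dict = {code: name for code, name in coursedetails}
--     student_dict = {roll: name for roll, name in studentdetails}
--
--     # Create a dictionary to store student grades
--     student_grades = {}
--     for roll, code, grade in grades:
--         if roll not in student_grades:
--             student_grades[roll] = []
--         student_grades[roll].append((code, course_dict[code], grade))
--
--     # Create the final consolidated grades list
--     consolidated_grades = []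
--     for roll, name in sorted(studentdetails, key=lambda x: x[0]):
--         if roll in student_grades:
--             student_grades[roll].sort(key=lambda x: x[0])
--             consolidated_grades.append((roll, name, student_grades[roll]))
--
--     return consolidated_grades
-- ===== SOURCE B (Python) =====
-- def transcript(coursedetails, studentdetails, grades):
--     # Sort decorated grade rows once by (roll, code); group consecutive runs
--     # of equal roll into an index, then emit the sorted students that have one.
--     course_dict = dict(coursedetails)
--     rows = sorted(((r, c, course_dict[c], g) for r, c, g in grades),
--                   key=lambda t: (t[0], t[1]))
--     groups = {}
--     i, n = 0, len(rows)
--     while i < n: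
--         j = i
--         while j < n and rows[j][0] == rows[i][0]:
--             j += 1
--         groups[rows[i][0]] = [t[1:] for t in rows[i:j]]
--         i = j
--     return [(roll, name, groups[roll])
--             for roll, name in sorted(studentdetails, key=lambda x: x[0])
--             if roll in groups]
-- ===== Notes on version B (the rewrite author's own statement) =====
-- stated objective: alternative
-- what changed: B sorts the decorated grade rows once by (roll, code), groups consecutive equal-roll runs into a roll->entries index in one linear sweep, and emits via a comprehension over sorted students, instead of A's incremental per-roll bucket dict with a separate sort of each bucket per emitted student row.
import Mathlib
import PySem

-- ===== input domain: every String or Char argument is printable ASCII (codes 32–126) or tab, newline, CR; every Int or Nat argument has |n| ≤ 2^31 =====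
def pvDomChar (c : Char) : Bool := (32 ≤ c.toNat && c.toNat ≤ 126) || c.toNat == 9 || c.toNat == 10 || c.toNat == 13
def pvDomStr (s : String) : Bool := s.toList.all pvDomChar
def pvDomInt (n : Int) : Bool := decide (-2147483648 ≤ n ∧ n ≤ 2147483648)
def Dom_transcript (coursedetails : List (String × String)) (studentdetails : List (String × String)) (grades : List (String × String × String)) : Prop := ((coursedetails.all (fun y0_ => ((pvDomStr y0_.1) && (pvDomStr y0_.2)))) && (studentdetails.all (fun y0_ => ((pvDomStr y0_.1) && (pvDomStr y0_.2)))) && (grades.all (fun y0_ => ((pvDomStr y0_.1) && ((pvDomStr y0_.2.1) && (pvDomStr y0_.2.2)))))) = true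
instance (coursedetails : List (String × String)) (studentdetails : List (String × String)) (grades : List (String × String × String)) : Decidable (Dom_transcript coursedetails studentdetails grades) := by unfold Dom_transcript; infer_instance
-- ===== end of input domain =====

-- B sorts the decorated grade rows once by (roll, code), groups consecutive equal-roll runs into
-- an index by a linear sweep, and emits via a comprehension, instead of A's per-roll bucket dict
-- with each bucket sorted separately (objective: alternative).

-- ===== PORT A =====
-- `course_dict[code]` raises KeyError on an unknown code; Pre_transcript excludes exactly those
-- inputs, so the `getD ""` default is never hit inside Pre_. A sorts `student_grades[roll]` in
-- place; for a duplicate roll the second pass re-sorts the already-sorted bucket, which holds the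
-- same values, so sorting afresh at each row is value-exact.
def transcript (coursedetails : List (String × String)) (studentdetails : List (String × String)) (grades : List (String × String × String)) : List (String × String × (List (String × String × String))) :=
  let course_dict : PySem.Dict String String := PySem.Dict.ofList coursedetails
  let _student_dict : PySem.Dict String String := PySem.Dict.ofList studentdetails
  let student_grades : PySem.Dict String (List (String × String × String)) :=
    grades.foldl (fun d g =>
      let d' := if d.contains g.1 then d else d.insert g.1 []
      d'.modify g.1 [] (fun l => l ++ [(g.2.1, course_dict.getD g.2.1 "", g.2.2)]))
      PySem.Dict.empty
  (PySem.List.sorted studentdetails (fun x => x.1)).foldl (fun acc rn =>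
    if student_grades.contains rn.1 then
      acc ++ [(rn.1, rn.2, PySem.List.sorted (student_grades.getD rn.1 []) (fun x => x.1))]
    else acc) []

-- ===== PORT B =====
-- the `while i < n` sweep of Source B: each outer step peels one maximal run of equal-roll rows
-- (the inner `while j` = takeWhile/dropWhile) and records (roll, entries-without-roll).
def pvGroupRuns (rows : List (String × String × String × String)) : List (String × List (String × String × String)) :=
  match rows with
  | [] => []
  | t :: ts =>
    (t.1, (t :: ts.takeWhile (fun u => u.1 == t.1)).map (fun u => u.2)) ::
      pvGroupRuns (ts.dropWhile (fun u => u.1 == t.1))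
termination_by rows.length
decreasing_by
  have := List.length_dropWhile_le (fun u => u.1 == t.1) ts
  simp only [List.length_cons]
  omega

def transcript_alt (coursedetails : List (String × String)) (studentdetails : List (String × String)) (grades : List (String × String × String)) : List (String × String × (List (String × String × String))) :=
  let course_dict : PySem.Dict String String := PySem.Dict.ofList coursedetails
  let rows : List (String × String × String × String) :=
    PySem.List.sorted2 (grades.map (fun g => (g.1, g.2.1, course_dict.getD g.2.1 "", g.2.2)))
      (fun t => t.1) (fun t => t.2.1)
  let groups : List (String × List (String × String × String)) := pvGroupRuns rows
  (PySem.List.sorted studentdetails (fun x => x.1)).filterMap (fun rn =>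
    match groups.find? (fun p => p.1 == rn.1) with
    | some p => some (rn.1, rn.2, p.2)
    | none => none)

-- ===== PRECONDITION & SPEC =====
-- Pre_ excludes exactly the inputs where the Python A raises KeyError: a graded entry whose
-- course code is not a key of coursedetails (B raises there too).
def Pre_transcript (coursedetails : List (String × String)) (studentdetails : List (String × String)) (grades : List (String × String × String)) : Prop :=
  grades.all (fun g => coursedetails.any (fun cd => cd.1 == g.2.1)) = true
instance (coursedetails : List (String × String)) (studentdetails : List (String × String)) (grades : List (String × String × String)) : Decidable (Pre_transcript coursedetails studentdetails grades) := by unfold Pre_transcript; infer_instance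

def pvWitness_transcript : (List (String × String)) × (List (String × String)) × (List (String × String × String)) :=
  ([("C1", "Maths"), ("C2", "Physics")], [("2", "Bob"), ("1", "Ann")], [("1", "C2", "B"), ("1", "C1", "A"), ("2", "C1", "C")])

def Spec_transcript (coursedetails : List (String × String)) (studentdetails : List (String × String)) (grades : List (String × String × String)) (out : List (String × String × (List (String × String × String)))) : Prop := out = transcript_alt coursedetails studentdetails grades
instance (coursedetails : List (String × String)) (studentdetails : List (String × String)) (grades : List (String × String × String)) (out : List (String × String × (List (String × String × String)))) : Decidable (Spec_transcript coursedetails studentdetails grades out) := by unfold Spec_transcript; infer_instance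

-- ===== CLAIM (what is proved, stated in full; the proofs are below) =====
def Claim_equal_transcript : Prop := ∀ (coursedetails : List (String × String)) (studentdetails : List (String × String)) (grades : List (String × String × String)), Dom_transcript coursedetails studentdetails grades → Pre_transcript coursedetails studentdetails grades → Spec_transcript coursedetails studentdetails grades (transcript coursedetails studentdetails grades)

-- ===== LEMMAS AND PROOFS =====

-- The lexicographic "before" predicate `sorted2 xs k1 k2` inserts with.
def pvLt2 {α κ₁ κ₂ : Type} [LinearOrder κ₁] [LinearOrder κ₂] (k1 : α → κ₁) (k2 : α → κ₂) (a b : α) : Bool :=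
  decide (k1 a < k1 b) || (!decide (k1 b < k1 a) && decide (k2 a < k2 b))

theorem pvLt2_iff {α κ₁ κ₂ : Type} [LinearOrder κ₁] [LinearOrder κ₂] (k1 : α → κ₁) (k2 : α → κ₂) (a b : α) :
    pvLt2 k1 k2 a b = true ↔ (k1 a < k1 b ∨ (k1 a = k1 b ∧ k2 a < k2 b)) := by
  simp only [pvLt2, Bool.or_eq_true, Bool.and_eq_true, Bool.not_eq_true', decide_eq_true_eq,
    decide_eq_false_iff_not, not_lt]
  constructor
  · rintro (h | ⟨hle, hlt⟩)
    · exact Or.inl h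
    · rcases lt_or_eq_of_le hle with h | h
      · exact Or.inl h
      · exact Or.inr ⟨h, hlt⟩
  · rintro (h | ⟨he, hlt⟩)
    · exact Or.inl h
    · exact Or.inr ⟨le_of_eq he, hlt⟩

theorem pvLt2_false_iff {α κ₁ κ₂ : Type} [LinearOrder κ₁] [LinearOrder κ₂] (k1 : α → κ₁) (k2 : α → κ₂) (a b : α) :
    pvLt2 k1 k2 a b = false ↔ (k1 b ≤ k1 a ∧ (k1 a = k1 b → k2 b ≤ k2 a)) := by
  rw [Bool.eq_false_iff, Ne, pvLt2_iff]
  push_neg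
  rfl

theorem pvLt2_asymm {α κ₁ κ₂ : Type} [LinearOrder κ₁] [LinearOrder κ₂] (k1 : α → κ₁) (k2 : α → κ₂)
    {a b : α} (h : pvLt2 k1 k2 a b = true) : pvLt2 k1 k2 b a = false := by
  rw [pvLt2_false_iff]
  rcases (pvLt2_iff k1 k2 a b).1 h with h | ⟨he, hk⟩
  · exact ⟨le_of_lt h, fun hh => absurd (hh ▸ h) (lt_irrefl _)⟩
  · exact ⟨le_of_eq he, fun _ => le_of_lt hk⟩

theorem pvLt2_trans_le {α κ₁ κ₂ : Type} [LinearOrder κ₁] [LinearOrder κ₂] (k1 : α → κ₁) (k2 : α → κ₂)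
    {a b c : α} (h1 : pvLt2 k1 k2 a b = true) (h2 : pvLt2 k1 k2 c b = false) : pvLt2 k1 k2 a c = true := by
  rw [pvLt2_iff]
  rcases (pvLt2_false_iff k1 k2 c b).1 h2 with ⟨hbc, hcs⟩
  rcases (pvLt2_iff k1 k2 a b).1 h1 with h | ⟨he, hk⟩
  · exact Or.inl (lt_of_lt_of_le h hbc)
  · rcases lt_or_eq_of_le hbc with h' | h'
    · exact Or.inl (he ▸ h')
    · exact Or.inr ⟨he.trans h', lt_of_lt_of_le hk (hcs h'.symm)⟩

-- x inserted before y goes before everything y is ≤-before.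
theorem pvLt2_head_all {α κ₁ κ₂ : Type} [LinearOrder κ₁] [LinearOrder κ₂] (k1 : α → κ₁) (k2 : α → κ₂)
    {x y : α} {ys : List α} (hxy : pvLt2 k1 k2 x y = true)
    (hp : (y :: ys).Pairwise (fun a b => pvLt2 k1 k2 b a = false)) :
    ∀ z ∈ y :: ys, pvLt2 k1 k2 x z = true := by
  intro z hz
  rcases List.mem_cons.1 hz with rfl | hz
  · exact hxy
  · exact pvLt2_trans_le k1 k2 hxy ((List.pairwise_cons.1 hp).1 z hz)

theorem pairwise_insertBy_pvLt2 {α κ₁ κ₂ : Type} [LinearOrder κ₁] [LinearOrder κ₂] (k1 : α → κ₁) (k2 : α → κ₂)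
    (x : α) (acc : List α) (h : acc.Pairwise (fun a b => pvLt2 k1 k2 b a = false)) :
    (PySem.List.insertBy (pvLt2 k1 k2) x acc).Pairwise (fun a b => pvLt2 k1 k2 b a = false) := by
  induction acc with
  | nil => simp [PySem.List.insertBy]
  | cons y ys ih =>
    rw [List.pairwise_cons] at h
    by_cases hxy : pvLt2 k1 k2 x y = true
    · simp only [PySem.List.insertBy, hxy, if_true]
      refine List.pairwise_cons.2 ⟨?_, List.pairwise_cons.2 h⟩
      intro z hz
      exact pvLt2_asymm k1 k2 (pvLt2_head_all k1 k2 hxy (List.pairwise_cons.2 h) z hz)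
    · rw [Bool.not_eq_true] at hxy
      simp only [PySem.List.insertBy, hxy, Bool.false_eq_true, if_false]
      refine List.pairwise_cons.2 ⟨?_, ih h.2⟩
      intro z hz
      rcases (PySem.List.mem_insertBy _ _ _ _).1 hz with rfl | hz
      · exact hxy
      · exact h.1 z hz

theorem pairwise_foldl_insertBy_pvLt2 {α κ₁ κ₂ : Type} [LinearOrder κ₁] [LinearOrder κ₂] (k1 : α → κ₁) (k2 : α → κ₂)
    (xs : List α) : ∀ acc, acc.Pairwise (fun a b => pvLt2 k1 k2 b a = false) →
    (xs.foldl (fun a x => PySem.List.insertBy (pvLt2 k1 k2) x a) acc).Pairwise (fun a b => pvLt2 k1 k2 b a = false) := by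
  induction xs with
  | nil => intro acc h; exact h
  | cons x xs ih => intro acc h; exact ih _ (pairwise_insertBy_pvLt2 k1 k2 x acc h)

-- the globally sorted list is nondecreasing in its first key
theorem sorted2_pairwise_fst {α κ₁ κ₂ : Type} [LinearOrder κ₁] [LinearOrder κ₂] (k1 : α → κ₁) (k2 : α → κ₂)
    (xs : List α) : (PySem.List.sorted2 xs k1 k2).Pairwise (fun a b => k1 a ≤ k1 b) := by
  have h0 : PySem.List.sorted2 xs k1 k2 =
      xs.foldl (fun a x => PySem.List.insertBy (pvLt2 k1 k2) x a) [] := rfl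
  rw [h0]
  refine (pairwise_foldl_insertBy_pvLt2 k1 k2 xs [] List.Pairwise.nil).imp ?_
  intro a b hab
  exact ((pvLt2_false_iff k1 k2 b a).1 hab).1

theorem filter_insertBy_pvLt2 {α κ₁ κ₂ : Type} [LinearOrder κ₁] [LinearOrder κ₂] (k1 : α → κ₁) (k2 : α → κ₂)
    (r : κ₁) (x : α) (acc : List α) (h : acc.Pairwise (fun a b => pvLt2 k1 k2 b a = false)) :
    (PySem.List.insertBy (pvLt2 k1 k2) x acc).filter (fun a => decide (k1 a = r)) =
      if k1 x = r then
        PySem.List.insertBy (fun a b => decide (k2 a < k2 b)) x (acc.filter (fun a => decide (k1 a = r)))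
      else acc.filter (fun a => decide (k1 a = r)) := by
  induction acc with
  | nil =>
    by_cases hx : k1 x = r <;> simp [PySem.List.insertBy, hx]
  | cons y ys ih =>
    have htl : ys.Pairwise (fun a b => pvLt2 k1 k2 b a = false) := (List.pairwise_cons.1 h).2
    by_cases hxy : pvLt2 k1 k2 x y = true
    · rw [show PySem.List.insertBy (pvLt2 k1 k2) x (y :: ys) = x :: y :: ys by
        simp [PySem.List.insertBy, hxy]]
      rw [List.filter_cons]
      by_cases hx : k1 x = r
      · rw [if_pos (by simpa using hx), if_pos hx]
        generalize hfe : (y :: ys).filter (fun a => decide (k1 a = r)) = fl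
        cases fl with
        | nil => simp [PySem.List.insertBy]
        | cons z t =>
          have hz : z ∈ (y :: ys).filter (fun a => decide (k1 a = r)) := by
            rw [hfe]; exact List.mem_cons_self
          have hzm := List.mem_filter.1 hz
          have hzr : k1 z = r := by simpa using hzm.2
          have hxz : pvLt2 k1 k2 x z = true := pvLt2_head_all k1 k2 hxy h z hzm.1
          have hk2 : k2 x < k2 z := by
            rcases (pvLt2_iff k1 k2 x z).1 hxz with hlt | ⟨_, hk⟩
            · exact absurd hlt (by rw [hx, hzr]; exact lt_irrefl r)
            · exact hk
          simp [PySem.List.insertBy, hk2]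
      · rw [if_neg (by simpa using hx), if_neg hx]
    · rw [Bool.not_eq_true] at hxy
      rw [show PySem.List.insertBy (pvLt2 k1 k2) x (y :: ys)
            = y :: PySem.List.insertBy (pvLt2 k1 k2) x ys by simp [PySem.List.insertBy, hxy]]
      rcases (pvLt2_false_iff k1 k2 x y).1 hxy with ⟨hyx, hys⟩
      simp only [List.filter_cons]
      by_cases hx : k1 x = r <;> by_cases hy : k1 y = r
      · have hxy2 : ¬ k2 x < k2 y := not_lt.2 (hys (hx.trans hy.symm))
        rw [if_pos (by simpa using hy), ih htl, if_pos hx, if_pos hx]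
        simp [hy, PySem.List.insertBy, hxy2]
      · rw [if_neg (by simpa using hy), ih htl, if_pos hx, if_pos hx]
        simp [hy]
      · rw [if_pos (by simpa using hy), ih htl, if_neg hx, if_neg hx]
        simp [hy]
      · rw [if_neg (by simpa using hy), ih htl, if_neg hx, if_neg hx]
        simp [hy]

theorem filter_foldl_insertBy {α κ₁ κ₂ : Type} [LinearOrder κ₁] [LinearOrder κ₂] (k1 : α → κ₁) (k2 : α → κ₂)
    (r : κ₁) (xs : List α) : ∀ acc, acc.Pairwise (fun a b => pvLt2 k1 k2 b a = false) →
    (xs.foldl (fun a x => PySem.List.insertBy (pvLt2 k1 k2) x a) acc).filter (fun a => decide (k1 a = r)) =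
      (xs.filter (fun a => decide (k1 a = r))).foldl
        (fun a x => PySem.List.insertBy (fun a b => decide (k2 a < k2 b)) x a)
        (acc.filter (fun a => decide (k1 a = r))) := by
  induction xs with
  | nil => intro acc _; rfl
  | cons x xs ih =>
    intro acc h
    simp only [List.foldl_cons, List.filter_cons, decide_eq_true_eq]
    rw [ih _ (pairwise_insertBy_pvLt2 k1 k2 x acc h), filter_insertBy_pvLt2 k1 k2 r x acc h]
    by_cases hx : k1 x = r <;> simp [hx]

-- Stability of sorted2: the r-keyed slice of the globally (k1,k2)-sorted list IS the
-- k2-sort of the r-keyed slice of the original list.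
theorem filter_sorted2 {α κ₁ κ₂ : Type} [LinearOrder κ₁] [LinearOrder κ₂] (k1 : α → κ₁) (k2 : α → κ₂)
    (xs : List α) (r : κ₁) :
    (PySem.List.sorted2 xs k1 k2).filter (fun a => decide (k1 a = r)) =
      PySem.List.sorted (xs.filter (fun a => decide (k1 a = r))) k2 := by
  rw [PySem.List.sorted_eq_foldl_insertBy]
  have h0 : PySem.List.sorted2 xs k1 k2 =
      xs.foldl (fun a x => PySem.List.insertBy (pvLt2 k1 k2) x a) [] := rfl
  rw [h0]
  exact filter_foldl_insertBy k1 k2 r xs [] List.Pairwise.nil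

-- sorting commutes with mapping off the decoration when the key factors through the map
theorem map_insertBy_key {α β κ : Type} [LinearOrder κ] (g : α → β) (k : β → κ) (x : α) (l : List α) :
    (PySem.List.insertBy (fun a b => decide (k (g a) < k (g b))) x l).map g =
      PySem.List.insertBy (fun a b => decide (k a < k b)) (g x) (l.map g) := by
  induction l with
  | nil => simp [PySem.List.insertBy]
  | cons y ys ih =>
    by_cases hk : k (g x) < k (g y) <;> simp [PySem.List.insertBy, hk, ih]

theorem map_sorted_key {α β κ : Type} [LinearOrder κ] (g : α → β) (k : β → κ) (l : List α) :
    (PySem.List.sorted l (fun a => k (g a))).map g = PySem.List.sorted (l.map g) k := by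
  rw [PySem.List.sorted_eq_foldl_insertBy, PySem.List.sorted_eq_foldl_insertBy]
  have main : ∀ (l : List α) (acc : List α),
      (l.foldl (fun a x => PySem.List.insertBy (fun a b => decide (k (g a) < k (g b))) x a) acc).map g =
        (l.map g).foldl (fun a x => PySem.List.insertBy (fun a b => decide (k a < k b)) x a) (acc.map g) := by
    intro l
    induction l with
    | nil => intro acc; rfl
    | cons x xs ih => intro acc; simp only [List.foldl_cons, List.map_cons, ih, map_insertBy_key]
  exact main l []

-- A's "if roll not in d: d[roll]=[]" followed by append is a plain modify.
theorem modify_insert_fresh {κ ν : Type} [BEq κ] [LawfulBEq κ] (d : PySem.Dict κ ν) (k : κ) (d0 : ν)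
    (f : ν → ν) (h : d.contains k = false) :
    (d.insert k d0).modify k d0 f = d.modify k d0 f := by
  unfold PySem.Dict.modify
  rw [PySem.Dict.insert_insert_self, PySem.Dict.getD_insert_self, PySem.Dict.getD_of_not_contains d d0 h]

theorem gradefold_eq (course_dict : PySem.Dict String String) (grades : List (String × String × String)) :
    grades.foldl (fun d g =>
        let d' := if d.contains g.1 then d else d.insert g.1 []
        d'.modify g.1 [] (fun l => l ++ [(g.2.1, course_dict.getD g.2.1 "", g.2.2)]))
      PySem.Dict.empty =
    (grades.map (fun g => (g.1, g.2.1, course_dict.getD g.2.1 "", g.2.2))).foldl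
      (fun d p => d.modify p.1 [] (fun l => l ++ [p.2])) PySem.Dict.empty := by
  rw [List.foldl_map]
  refine PySem.List.foldl_congr_mem _ _ _ _ ?_
  intro d g _
  by_cases h : d.contains g.1 = true
  · simp only [h, if_true]
  · rw [Bool.not_eq_true] at h
    simp only [h, Bool.false_eq_true, if_false]
    exact modify_insert_fresh d g.1 [] _ h

-- In a list nondecreasing in .1, the head's run is exactly the head-keyed filter.
theorem filter_eq_takeWhile_of_sorted (t : String × String × String × String)
    (ts : List (String × String × String × String))
    (h : (t :: ts).Pairwise (fun a b => a.1 ≤ b.1)) :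
    ts.filter (fun u => u.1 == t.1) = ts.takeWhile (fun u => u.1 == t.1) := by
  induction ts with
  | nil => rfl
  | cons y ys ih =>
    have hty : t.1 ≤ y.1 := (List.pairwise_cons.1 h).1 y List.mem_cons_self
    have hyys : (y :: ys).Pairwise (fun a b => a.1 ≤ b.1) := (List.pairwise_cons.1 h).2
    by_cases hy : y.1 = t.1
    · have htys : (t :: ys).Pairwise (fun a b => a.1 ≤ b.1) := by
        refine List.pairwise_cons.2 ⟨?_, (List.pairwise_cons.1 hyys).2⟩
        intro z hz
        exact le_trans hty (hy ▸ (List.pairwise_cons.1 hyys).1 z hz)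
      simp [hy, ih htys]
    · have hlt : t.1 < y.1 := lt_of_le_of_ne hty (fun e => hy e.symm)
      have hnil : (y :: ys).filter (fun u => u.1 == t.1) = [] := by
        rw [List.filter_eq_nil_iff]
        intro u hu
        rcases List.mem_cons.1 hu with rfl | hu
        · simp [hy]
        · have hle : y.1 ≤ u.1 := (List.pairwise_cons.1 hyys).1 u hu
          have hltu : t.1 < u.1 := lt_of_lt_of_le hlt hle
          simp only [beq_iff_eq]
          exact fun e => absurd hltu (by rw [e]; exact lt_irrefl _)
      rw [hnil, List.takeWhile_cons, if_neg (by simp [hy])]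

-- lookup in the run index = the keyed slice of the sorted row list (when nonempty)
theorem find?_groupRuns (rows : List (String × String × String × String))
    (h : rows.Pairwise (fun a b => a.1 ≤ b.1)) (r : String) :
    (pvGroupRuns rows).find? (fun p => p.1 == r) =
      if rows.filter (fun u => u.1 == r) = [] then none
      else some (r, (rows.filter (fun u => u.1 == r)).map (fun u => u.2)) := by
  induction rows using pvGroupRuns.induct with
  | case1 => simp [pvGroupRuns]
  | case2 t ts ih =>
    rw [pvGroupRuns]
    by_cases ht : t.1 = r
    · subst ht
      rw [List.find?_cons_of_pos (by simp)]
      have hfil : (t :: ts).filter (fun u => u.1 == t.1) = t :: ts.takeWhile (fun u => u.1 == t.1) := by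
        rw [List.filter_cons, if_pos (by simp), filter_eq_takeWhile_of_sorted t ts h]
      rw [hfil, if_neg (by simp)]
    · rw [List.find?_cons_of_neg (by simp [ht])]
      have hrest : (t :: ts).filter (fun u => u.1 == r) =
          (ts.dropWhile (fun u => u.1 == t.1)).filter (fun u => u.1 == r) := by
        rw [List.filter_cons, if_neg (by simp [ht]), ← List.takeWhile_append_dropWhile
          (p := fun u => u.1 == t.1) (l := ts), List.filter_append]
        rw [List.takeWhile_append_dropWhile]
        have : (ts.takeWhile (fun u => u.1 == t.1)).filter (fun u => u.1 == r) = [] := by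
          rw [List.filter_eq_nil_iff]
          intro u hu
          have := List.mem_takeWhile_imp (l := ts) (p := fun u : String × String × String × String => u.1 == t.1) (x := u) hu
          simp only [beq_iff_eq] at this
          simp [this, ht]
        rw [this, List.nil_append]
      have hdrop : (ts.dropWhile (fun u => u.1 == t.1)).Pairwise (fun a b => a.1 ≤ b.1) :=
        h.sublist ((List.dropWhile_sublist _).cons _)
      rw [hrest, ih hdrop]

-- a filterMap whose step is an if-option is a filter-then-map
theorem filterMap_eq_filter_map {α β : Type} (g : α → Option β) (p : α → Bool) (f : α → β)
    (hg : ∀ x, g x = if p x then some (f x) else none) (l : List α) :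
    l.filterMap g = (l.filter p).map f := by
  induction l with
  | nil => rfl
  | cons x xs ih =>
    rw [List.filterMap_cons, List.filter_cons, hg x]
    by_cases hx : p x = true <;> simp [hx, ih]

-- ===== VERDICT (by name: the statement is the Claim_ definition above) =====
theorem transcript_spec : Claim_equal_transcript := by
  intro coursedetails studentdetails grades _ _
  unfold Spec_transcript
  simp only [transcript, transcript_alt]
  rw [gradefold_eq]
  set cd := PySem.Dict.ofList coursedetails with hcd
  set rows0 := grades.map (fun g => (g.1, g.2.1, cd.getD g.2.1 "", g.2.2)) with hrows0
  set sg := rows0.foldl (fun d p => d.modify p.1 [] (fun l => l ++ [p.2])) PySem.Dict.empty with hsg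
  set rows := PySem.List.sorted2 rows0 (fun t => t.1) (fun t => t.2.1) with hrows
  have hperm : rows0.Perm rows := (PySem.List.sorted2_perm rows0 _ _ false).symm
  have hpw : rows.Pairwise (fun a b => a.1 ≤ b.1) :=
    sorted2_pairwise_fst (fun t : String × String × String × String => t.1) (fun t => t.2.1) rows0
  have hkeys : sg.keys = PySem.Set.update PySem.Dict.empty.keys (rows0.map (fun p => p.1)) :=
    PySem.Dict.keys_foldl_modify_key rows0 (fun p => p.1) [] (fun _ p => fun l => l ++ [p.2]) PySem.Dict.empty
  have hmem : ∀ s : String, s ∈ sg.keys ↔ s ∈ rows0.map (fun p => p.1) := by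
    intro s
    rw [hkeys, PySem.Set.mem_update]
    simp [PySem.Dict.keys_empty]
  -- pointwise: B's lookup step is exactly A's guarded append step
  have hfc : ∀ (l : List (String × String × String × String)) (r : String),
      l.filter (fun p => p.1 == r) = l.filter (fun p => decide (p.1 = r)) := by
    intro l r; apply List.filter_congr; intro p _
    rw [Bool.eq_iff_iff]; simp [beq_iff_eq]
  have hpoint : ∀ rn : String × String,
      (match (pvGroupRuns rows).find? (fun p => p.1 == rn.1) with
        | some p => some (rn.1, rn.2, p.2)
        | none => none) =
      if sg.contains rn.1 then
        some (rn.1, rn.2, PySem.List.sorted (sg.getD rn.1 []) (fun x => x.1))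
      else none := by
    intro rn
    have hfilperm : (rows0.filter (fun u => u.1 == rn.1)).Perm (rows.filter (fun u => u.1 == rn.1)) :=
      hperm.filter _
    by_cases hc : sg.contains rn.1 = true
    · have hr : rn.1 ∈ rows0.map (fun p => p.1) :=
        (hmem rn.1).1 ((PySem.Dict.contains_iff_mem_keys sg rn.1).1 hc)
      have hne : rows.filter (fun u => u.1 == rn.1) ≠ [] := by
        intro hnil
        have h0 : rows0.filter (fun u => u.1 == rn.1) = [] := (hnil ▸ hfilperm).eq_nil
        rcases List.mem_map.1 hr with ⟨p, hp, hp1⟩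
        have hpm : p ∈ rows0.filter (fun u => u.1 == rn.1) := List.mem_filter.2 ⟨hp, by simp [hp1]⟩
        rw [h0] at hpm
        exact List.not_mem_nil hpm
      rw [find?_groupRuns rows hpw rn.1, if_neg hne, if_pos hc]
      have hval : sg.getD rn.1 [] = (rows0.filter (fun p => p.1 == rn.1)).map (fun p => p.2) := by
        rw [hsg, PySem.Dict.getD_foldl_modify_append, PySem.Dict.getD_empty, List.nil_append]
      rw [hval]
      have hmain : PySem.List.sorted ((rows0.filter (fun p => p.1 == rn.1)).map (fun p => p.2)) (fun x => x.1)
          = (rows.filter (fun t => t.1 == rn.1)).map (fun t => t.2) := by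
        rw [hfc rows0, hfc rows, hrows,
          filter_sorted2 (fun t : String × String × String × String => t.1) (fun t => t.2.1) rows0 rn.1,
          ← map_sorted_key (fun p : String × String × String × String => p.2)
            (fun t : String × String × String => t.1) (rows0.filter (fun p => decide (p.1 = rn.1)))]
      rw [hmain]
    · rw [Bool.not_eq_true] at hc
      have hr : rn.1 ∉ rows0.map (fun p => p.1) := by
        intro hr
        exact absurd ((PySem.Dict.contains_iff_mem_keys sg rn.1).2 ((hmem rn.1).2 hr)) (by simp [hc])
      have h0 : rows0.filter (fun u => u.1 == rn.1) = [] := by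
        rw [List.filter_eq_nil_iff]
        intro u hu
        simp only [beq_iff_eq]
        exact fun e => hr (List.mem_map.2 ⟨u, hu, e⟩)
      have hnil : rows.filter (fun u => u.1 == rn.1) = [] := ((h0 ▸ hfilperm).symm).eq_nil
      rw [find?_groupRuns rows hpw rn.1, if_pos hnil, hc]
      simp
  rw [PySem.List.foldl_append_if
    (p := fun rn : String × String => sg.contains rn.1)
    (f := fun rn : String × String =>
      (rn.1, rn.2, PySem.List.sorted (sg.getD rn.1 []) (fun x => x.1))),
    List.nil_append,
    filterMap_eq_filter_map _ (fun rn : String × String => sg.contains rn.1)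
      (fun rn : String × String =>
        (rn.1, rn.2, PySem.List.sorted (sg.getD rn.1 []) (fun x => x.1)))
      hpoint]
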